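-- pv_equiv track=rewrite | github.com/abdjiber/catecm | helpers.py | get_focalsets
-- ===== SOURCE A (Python) =====
-- from itertools import chain, combinations
--
-- def get_focalsets(n_clusters, type_fs):
--     """Generate folcal sets.
--
--     Parameters
--     ----------
--     n_clusters : int
--         The number of desired clusters.
--
--     type_fs : "singleton", "doublon" or "all", default="doublon"
--         Specify the type of desired focal sets. If the value is "singletons",
--         then the focal sets are: the empty set, focal sets with size 1
--         (i.e., clusters) and Omega. If the value is "doublon" the focal sets are:
--         the empty set, focal sets with size less than two and Omega.
--         If the value is "all", then all the focal sets are used.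
--
--     Returns
--     -------
--     foclasets : array of length n_clusters + 2 if type_fs="singleton",
--         (n_cluster! /(n_clusters - 2)!*2!) + 2 and 2^n_clusters if type_fs="all".
--         The generated focal sets.
--     """
--     omega = list(range(1, n_clusters + 1))
--     focalsets = list(
--         chain.from_iterable(
--             combinations(omega, i) for i in range(n_clusters + 1)))
--     if type_fs == 'doublon':
--         focalsets = [
--             fs for fs in focalsets if len(fs) <= 2 or len(fs) == n_clusters
--         ]
--     elif type_fs == 'singleton':
--         focalsets = [
--             fs for fs in focalsets if len(fs) <= 1 or len(fs) == n_clusters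
--         ]
--     return focalsets
-- ===== SOURCE B (Python) =====
-- def _combs(items, k):
--     if k == 0:
--         return [()]
--     if not items:
--         return []
--     head, rest = items[0], items[1:]
--     return [(head,) + c for c in _combs(rest, k - 1)] + _combs(rest, k)
--
--
-- def get_focalsets(n_clusters, type_fs):
--     omega = tuple(range(1, n_clusters + 1))
--     if type_fs == 'doublon':
--         small = min(2, n_clusters)
--     elif type_fs == 'singleton':
--         small = min(1, n_clusters)
--     else:
--         small = n_clusters
--     res = []
--     for k in range(small + 1):
--         res += _combs(omega, k)
--     if small < n_clusters:
--         res.append(omega)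
--     return res
-- ===== Notes on version B (the rewrite author's own statement) =====
-- stated objective: alternative
-- what changed: B generates only the focal-set sizes actually needed (0..min(cap,n), plus omega when the cap is below n) via a recursive combinations helper, instead of materialising the full power set and filtering it by length.
import Mathlib
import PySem

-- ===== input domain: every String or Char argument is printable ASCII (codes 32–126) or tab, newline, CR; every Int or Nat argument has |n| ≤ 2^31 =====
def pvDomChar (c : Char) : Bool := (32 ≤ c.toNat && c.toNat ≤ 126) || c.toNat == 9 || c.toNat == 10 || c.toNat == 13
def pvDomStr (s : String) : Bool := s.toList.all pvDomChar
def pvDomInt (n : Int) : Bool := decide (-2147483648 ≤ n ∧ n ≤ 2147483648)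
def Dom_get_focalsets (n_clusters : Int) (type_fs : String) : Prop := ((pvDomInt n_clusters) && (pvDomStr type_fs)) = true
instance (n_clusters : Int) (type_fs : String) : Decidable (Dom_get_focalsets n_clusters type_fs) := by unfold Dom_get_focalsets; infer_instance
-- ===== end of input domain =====

-- B generates only the needed focal-set sizes directly (plus omega) instead of filtering the full power set by length.

-- Hand port of itertools.combinations(lst, k) (lexicographic k-combinations of a list);
-- exact for any list and k ≥ 0.  B's Python helper _combs is this same recursion.
def pvCombs : List Int → Nat → List (List Int)
  | _, 0 => [[]]
  | [], _ + 1 => []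
  | x :: xs, k + 1 => (pvCombs xs k).map (fun c => x :: c) ++ pvCombs xs (k + 1)

-- ===== PORT A =====
def get_focalsets (n_clusters : Int) (type_fs : String) : List (List Int) :=
  let omega := PySem.List.pyRange 1 (n_clusters + 1) 1
  let focalsets := (PySem.List.pyRange 0 (n_clusters + 1) 1).flatMap
    (fun i => pvCombs omega i.toNat)   -- i ∈ range(n+1) is ≥ 0, so i.toNat is exact
  if type_fs == "doublon" then
    focalsets.filter (fun fs => decide ((fs.length : Int) ≤ 2 ∨ (fs.length : Int) = n_clusters))
  else if type_fs == "singleton" then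
    focalsets.filter (fun fs => decide ((fs.length : Int) ≤ 1 ∨ (fs.length : Int) = n_clusters))
  else
    focalsets

-- ===== PORT B =====
def get_focalsets_alt (n_clusters : Int) (type_fs : String) : List (List Int) :=
  let omega := PySem.List.pyRange 1 (n_clusters + 1) 1
  let small : Int :=
    if type_fs == "doublon" then min 2 n_clusters
    else if type_fs == "singleton" then min 1 n_clusters
    else n_clusters
  let res := (PySem.List.pyRange 0 (small + 1) 1).foldl
    (fun acc k => acc ++ pvCombs omega k.toNat) []   -- k ∈ range(small+1) is ≥ 0, so k.toNat is exact
  if small < n_clusters then res ++ [omega] else res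

-- ===== PRECONDITION & SPEC =====
def Spec_get_focalsets (n_clusters : Int) (type_fs : String) (out : List (List Int)) : Prop := out = get_focalsets_alt n_clusters type_fs
instance (n_clusters : Int) (type_fs : String) (out : List (List Int)) : Decidable (Spec_get_focalsets n_clusters type_fs out) := by unfold Spec_get_focalsets; infer_instance

-- ===== CLAIM (what is proved, stated in full; the proofs are below) =====
def Claim_equal_get_focalsets : Prop := ∀ (n_clusters : Int) (type_fs : String), Dom_get_focalsets n_clusters type_fs → Spec_get_focalsets n_clusters type_fs (get_focalsets n_clusters type_fs)

-- ===== LEMMAS AND PROOFS =====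

theorem pvCombs_length (l : List Int) : ∀ (k : Nat) (c : List Int), c ∈ pvCombs l k → c.length = k := by
  induction l with
  | nil =>
    intro k c h
    cases k with
    | zero => simp [pvCombs] at h; simp [h]
    | succ k => simp [pvCombs] at h
  | cons x xs ih =>
    intro k c h
    cases k with
    | zero => simp [pvCombs] at h; simp [h]
    | succ k =>
      simp only [pvCombs, List.mem_append, List.mem_map] at h
      rcases h with ⟨c', hc', rfl⟩ | h
      · simp [ih k c' hc']
      · exact ih (k + 1) c h

theorem pvCombs_nil (l : List Int) : ∀ (k : Nat), l.length < k → pvCombs l k = [] := by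
  induction l with
  | nil => intro k hk; cases k with
    | zero => omega
    | succ k => rfl
  | cons x xs ih =>
    intro k hk
    cases k with
    | zero => simp at hk
    | succ k =>
      have h1 : xs.length < k := by simpa using hk
      simp [pvCombs, ih k h1, ih (k + 1) (Nat.lt_succ_of_lt h1)]

theorem pvCombs_self (l : List Int) : pvCombs l l.length = [l] := by
  induction l with
  | nil => rfl
  | cons x xs ih =>
    simp [pvCombs, ih, pvCombs_nil xs (xs.length + 1) (Nat.lt_succ_self _)]

theorem pvFlatMap_congr {α β : Type} (l : List α) (f g : α → List β)
    (h : ∀ a ∈ l, f a = g a) : l.flatMap f = l.flatMap g := by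
  induction l with
  | nil => rfl
  | cons x xs ih =>
    simp only [List.flatMap_cons, h x (List.mem_cons_self), ih (fun a ha => h a (List.mem_cons_of_mem _ ha))]

theorem pvFilter_flatMap {α β : Type} (l : List α) (f : α → List β) (p : β → Bool) :
    (l.flatMap f).filter p = l.flatMap (fun a => (f a).filter p) := by
  induction l with
  | nil => rfl
  | cons x xs ih => simp [List.flatMap_cons, List.filter_append, ih]

-- the heart of the proof: filtering the power set by "size ≤ c or size = n"
-- equals generating sizes 0..min c n plus omega
theorem filter_combs_split (n c : Int) (hc : 0 ≤ c) :
    (((PySem.List.pyRange 0 (n + 1) 1).flatMap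
        (fun i => pvCombs (PySem.List.pyRange 1 (n + 1) 1) i.toNat)).filter
      (fun fs => decide ((fs.length : Int) ≤ c ∨ (fs.length : Int) = n)))
    = ((PySem.List.pyRange 0 (min c n + 1) 1).flatMap
        (fun i => pvCombs (PySem.List.pyRange 1 (n + 1) 1) i.toNat))
      ++ (if min c n < n then [PySem.List.pyRange 1 (n + 1) 1] else []) := by
  set ω := PySem.List.pyRange 1 (n + 1) 1 with hω
  have hlen : ω.length = n.toNat := by
    rw [hω, PySem.List.length_pyRange_one]; omega
  set p : List Int → Bool := fun fs => decide ((fs.length : Int) ≤ c ∨ (fs.length : Int) = n) with hp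
  have hkeep : ∀ i : Int, 0 ≤ i → (i ≤ c ∨ i = n) →
      (pvCombs ω i.toNat).filter p = pvCombs ω i.toNat := by
    intro i hi hin
    apply List.filter_eq_self.mpr
    intro a ha
    have hl := pvCombs_length ω i.toNat a ha
    simp only [hp, decide_eq_true_eq, hl, Int.toNat_of_nonneg hi]
    exact hin
  have hdrop : ∀ i : Int, 0 ≤ i → ¬ i ≤ c → i ≠ n →
      (pvCombs ω i.toNat).filter p = [] := by
    intro i hi h1 h2
    apply List.filter_eq_nil_iff.mpr
    intro a ha
    have hl := pvCombs_length ω i.toNat a ha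
    simp only [hp, decide_eq_true_eq, hl, Int.toNat_of_nonneg hi]
    omega
  rw [pvFilter_flatMap]
  by_cases hnc : n ≤ c
  · have hmin : min c n = n := min_eq_right hnc
    rw [hmin, if_neg (lt_irrefl n), List.append_nil]
    apply pvFlatMap_congr
    intro i hi
    rw [PySem.List.mem_pyRange_one] at hi
    exact hkeep i hi.1 (Or.inl (le_trans (by omega) hnc))
  · rw [not_le] at hnc
    have hn0 : 0 ≤ n := le_trans hc (le_of_lt hnc)
    have hmin : min c n = c := min_eq_left (le_of_lt hnc)
    rw [hmin, if_pos hnc]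
    have hsplit1 : PySem.List.pyRange 0 (n + 1) 1
        = PySem.List.pyRange 0 (c + 1) 1 ++ PySem.List.pyRange (c + 1) (n + 1) 1 :=
      PySem.List.pyRange_one_append _ _ _ (by omega) (by omega)
    have hsplit2 : PySem.List.pyRange (c + 1) (n + 1) 1
        = PySem.List.pyRange (c + 1) n 1 ++ PySem.List.pyRange n (n + 1) 1 :=
      PySem.List.pyRange_one_append _ _ _ (by omega) (by omega)
    rw [hsplit1, hsplit2, List.flatMap_append, List.flatMap_append]
    have h1 : (PySem.List.pyRange 0 (c + 1) 1).flatMap (fun i => (pvCombs ω i.toNat).filter p)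
        = (PySem.List.pyRange 0 (c + 1) 1).flatMap (fun i => pvCombs ω i.toNat) := by
      apply pvFlatMap_congr
      intro i hi
      rw [PySem.List.mem_pyRange_one] at hi
      exact hkeep i hi.1 (Or.inl (by omega))
    have h2 : (PySem.List.pyRange (c + 1) n 1).flatMap (fun i => (pvCombs ω i.toNat).filter p) = [] := by
      apply List.flatMap_eq_nil_iff.mpr
      intro i hi
      rw [PySem.List.mem_pyRange_one] at hi
      exact hdrop i (by omega) (by omega) (by omega)
    have h3 : (PySem.List.pyRange n (n + 1) 1).flatMap (fun i => (pvCombs ω i.toNat).filter p) = [ω] := by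
      rw [PySem.List.pyRange_one_singleton]
      have : pvCombs ω n.toNat = [ω] := by rw [← hlen]; exact pvCombs_self ω
      simp only [List.flatMap_cons, List.flatMap_nil, List.append_nil, this]
      apply List.filter_eq_self.mpr
      intro a ha
      simp only [List.mem_singleton] at ha
      subst ha
      simp [hp, hlen, Int.toNat_of_nonneg hn0]
    rw [h1, h2, h3]; simp

-- ===== VERDICT (by name: the statement is the Claim_ definition above) =====
theorem get_focalsets_spec : Claim_equal_get_focalsets := by
  intro n t _
  show get_focalsets n t = get_focalsets_alt n t
  unfold get_focalsets get_focalsets_alt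
  simp only [PySem.List.foldl_append_eq_flatMap, List.nil_append]
  by_cases hd : (t == "doublon") = true
  · simp only [hd, if_pos]
    rw [show ∀ (r : List (List Int)) (b : Prop) [Decidable b] (w : List Int),
          (if b then r ++ [w] else r) = r ++ (if b then [w] else []) from
        by intro r b _ w; split <;> simp]
    exact filter_combs_split n 2 (by omega)
  · by_cases hs : (t == "singleton") = true
    · simp only [hd, hs, if_pos, if_neg, Bool.false_eq_true, not_false_iff]
      rw [show ∀ (r : List (List Int)) (b : Prop) [Decidable b] (w : List Int),
            (if b then r ++ [w] else r) = r ++ (if b then [w] else []) from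
          by intro r b _ w; split <;> simp]
      exact filter_combs_split n 1 (by omega)
    · simp only [hd, hs, Bool.false_eq_true, if_neg, not_false_iff, if_neg (lt_irrefl n)]
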